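-- pv_equiv track=rewrite | github.com/bward/ecc | number_theory.py | power_p2
-- ===== SOURCE A (Python) =====
-- def square_p2(x, p, i):
--     return (x[0]**2+i*x[1]**2) % p, (2*x[0]*x[1]) % p
--
-- def power_p2(x, n, p, i):
--     if n is 0:
--         return (1, 0)
--     elif n % 2:
--         new = power_p2(square_p2(x, p, i), (n - 1) // 2, p, i)
--         out = ((x[0]*new[0]+i*x[1]*new[1]) % p, (x[1]*new[0] + x[0]*new[1]) % p)
--         return out
--     else:
--         return power_p2(square_p2(x, p, i), n // 2, p, i)
-- ===== SOURCE B (Python) =====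
-- def power_p2(x, n, p, i):
--     # Left-to-right binary exponentiation in Z_p[sqrt(i)]:
--     # build the bit list of n (MSB first), then square-and-multiply top-down.
--     bits = []
--     m = n
--     while m > 0:
--         bits.append(m & 1)
--         m >>= 1
--     result = (1, 0)
--     for b in reversed(bits):
--         result = ((result[0] ** 2 + i * result[1] ** 2) % p,
--                   (2 * result[0] * result[1]) % p)
--         if b:
--             result = ((x[0] * result[0] + i * x[1] * result[1]) % p,
--                       (x[1] * result[0] + x[0] * result[1]) % p)
--     return result
-- ===== Notes on version B (the rewrite author's own statement) =====
-- stated objective: alternative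
-- what changed: Replaces A's recursive right-to-left square-and-multiply (recurse on n//2, combine on the way back up) by a left-to-right binary method: first extract n's bit list, then iterate MSB-to-LSB squaring an accumulator and multiplying in x on set bits; correct because multiplication in Z_p[sqrt(i)] is associative and commutative.
import Mathlib
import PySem

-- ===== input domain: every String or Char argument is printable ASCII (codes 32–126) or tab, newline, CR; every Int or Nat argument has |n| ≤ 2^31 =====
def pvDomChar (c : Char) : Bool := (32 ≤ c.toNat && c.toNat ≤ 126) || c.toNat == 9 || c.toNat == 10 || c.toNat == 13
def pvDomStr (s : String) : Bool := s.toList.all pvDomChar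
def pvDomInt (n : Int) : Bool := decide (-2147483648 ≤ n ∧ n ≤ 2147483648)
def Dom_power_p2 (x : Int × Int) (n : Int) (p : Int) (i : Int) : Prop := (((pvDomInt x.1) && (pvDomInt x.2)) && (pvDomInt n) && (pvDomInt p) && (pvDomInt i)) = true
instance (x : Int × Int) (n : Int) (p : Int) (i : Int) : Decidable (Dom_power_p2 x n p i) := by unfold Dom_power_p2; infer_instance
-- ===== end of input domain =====

-- B replaces A's recursive right-to-left square-and-multiply by a left-to-right binary method
-- (build the bit list of n, then square the accumulator and multiply in x on set bits).
-- Equal return values since multiplication in Z_p[sqrt(i)] is associative and commutative.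


-- ===== PORT A =====
def square_p2 (x : Int × Int) (p : Int) (i : Int) : Int × Int :=
  (PySem.Int.mod (x.1 ^ 2 + i * x.2 ^ 2) p, PySem.Int.mod (2 * x.1 * x.2) p)

-- recursion on a Nat exponent: faithful to A for n ≥ 0 (on n < 0 Python A never returns; Pre_ excludes it);
-- for n ≥ 0 Python's n % 2, (n-1)//2, n//2 coincide with the Nat operations used here
def powA (x : Int × Int) (n : Nat) (p : Int) (i : Int) : Int × Int :=
  if n = 0 then (1, 0)
  else if n % 2 = 1 then
    let new := powA (square_p2 x p i) ((n - 1) / 2) p i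
    (PySem.Int.mod (x.1 * new.1 + i * x.2 * new.2) p,
     PySem.Int.mod (x.2 * new.1 + x.1 * new.2) p)
  else powA (square_p2 x p i) (n / 2) p i
termination_by n
decreasing_by all_goals omega

def power_p2 (x : Int × Int) (n : Int) (p : Int) (i : Int) : Int × Int :=
  powA x n.toNat p i

-- ===== PORT B =====
-- the bit-extraction while-loop of Source B (LSB first), on the Nat value of n (loop runs only while m > 0)
def bitsB : Nat → List Bool
  | 0 => []
  | m + 1 => ((m + 1) % 2 = 1 : Bool) :: bitsB ((m + 1) / 2)

-- the 'for b in reversed(bits)' loop of Source B: square the accumulator, multiply in x on a set bit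
def loopB (x : Int × Int) (p : Int) (i : Int) : List Bool → (Int × Int) → Int × Int
  | [], r => r
  | b :: rest, r =>
    let s := (PySem.Int.mod (r.1 ^ 2 + i * r.2 ^ 2) p, PySem.Int.mod (2 * r.1 * r.2) p)
    loopB x p i rest
      (if b then (PySem.Int.mod (x.1 * s.1 + i * x.2 * s.2) p,
                  PySem.Int.mod (x.2 * s.1 + x.1 * s.2) p)
       else s)

def power_p2_alt (x : Int × Int) (n : Int) (p : Int) (i : Int) : Int × Int :=
  loopB x p i (bitsB n.toNat).reverse (1, 0)

-- ===== PRECONDITION & SPEC =====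
-- Pre_ excludes exactly the inputs where Python A raises: n < 0 (infinite recursion → RecursionError)
-- and p = 0 with n ≠ 0 (ZeroDivisionError in the first % p); at n = 0 A returns (1,0) without touching p.
def Pre_power_p2 (x : Int × Int) (n : Int) (p : Int) (i : Int) : Prop := 0 ≤ n ∧ (p ≠ 0 ∨ n = 0)
instance (x : Int × Int) (n : Int) (p : Int) (i : Int) : Decidable (Pre_power_p2 x n p i) := by unfold Pre_power_p2; infer_instance
def pvWitness_power_p2 : (Int × Int) × Int × Int × Int := ((2, 3), 5, 7, 1)

def Spec_power_p2 (x : Int × Int) (n : Int) (p : Int) (i : Int) (out : Int × Int) : Prop := out = power_p2_alt x n p i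
instance (x : Int × Int) (n : Int) (p : Int) (i : Int) (out : Int × Int) : Decidable (Spec_power_p2 x n p i out) := by unfold Spec_power_p2; infer_instance

-- ===== CLAIM (what is proved, stated in full; the proofs are below) =====
def Claim_equal_power_p2 : Prop := ∀ (x : Int × Int) (n : Int) (p : Int) (i : Int), Dom_power_p2 x n p i → Pre_power_p2 x n p i → Spec_power_p2 x n p i (power_p2 x n p i)

-- ===== LEMMAS AND PROOFS =====

-- exact (mod-free) multiplication and power in the ring Z[sqrt(i)], and componentwise reduction mod p
def qmul (i : Int) (a b : Int × Int) : Int × Int :=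
  (a.1 * b.1 + i * a.2 * b.2, a.2 * b.1 + a.1 * b.2)

def qpow (i : Int) (x : Int × Int) : Nat → Int × Int
  | 0 => (1, 0)
  | n + 1 => qmul i x (qpow i x n)

def red (p : Int) (a : Int × Int) : Int × Int := (PySem.Int.mod a.1 p, PySem.Int.mod a.2 p)

def PM (p : Int) (a b : Int × Int) : Prop := a.1 ≡ b.1 [ZMOD p] ∧ a.2 ≡ b.2 [ZMOD p]

-- MSB-first value of a bit list
def valM : List Bool → Nat
  | [] => 0
  | b :: L => (if b then 1 else 0) * 2 ^ L.length + valM L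

theorem fmod_congr {p a b : Int} (h : a ≡ b [ZMOD p]) : a.fmod p = b.fmod p := by
  obtain ⟨k, hk⟩ := h.dvd
  have hb : b = a + p * k := by linarith
  rw [hb, Int.add_mul_fmod_self_left]

theorem modEq_fmod (p a : Int) : a.fmod p ≡ a [ZMOD p] := by
  have h := Int.fmod_add_mul_fdiv a p
  exact Int.modEq_iff_dvd.mpr ⟨a.fdiv p, by linarith⟩

theorem PM_refl (p : Int) (a : Int × Int) : PM p a a := ⟨Int.ModEq.refl _, Int.ModEq.refl _⟩

theorem PM_red (p : Int) (a : Int × Int) : PM p (red p a) a :=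
  ⟨modEq_fmod p a.1, modEq_fmod p a.2⟩

theorem PM_trans {p : Int} {a b c : Int × Int} (h1 : PM p a b) (h2 : PM p b c) : PM p a c :=
  ⟨h1.1.trans h2.1, h1.2.trans h2.2⟩

theorem red_congr {p : Int} {a b : Int × Int} (h : PM p a b) : red p a = red p b := by
  simp only [red, PySem.Int.mod, Prod.mk.injEq]
  exact ⟨fmod_congr h.1, fmod_congr h.2⟩

theorem qmul_congr {p i : Int} {a a' b b' : Int × Int} (h1 : PM p a a') (h2 : PM p b b') :
    PM p (qmul i a b) (qmul i a' b') :=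
  ⟨(h1.1.mul h2.1).add (((Int.ModEq.refl i).mul h1.2).mul h2.2),
   (h1.2.mul h2.1).add (h1.1.mul h2.2)⟩

theorem qmul_comm (i : Int) (a b : Int × Int) : qmul i a b = qmul i b a := by
  simp only [qmul, Prod.mk.injEq]; constructor <;> ring

theorem qmul_assoc (i : Int) (a b c : Int × Int) :
    qmul i (qmul i a b) c = qmul i a (qmul i b c) := by
  simp only [qmul, Prod.mk.injEq]; constructor <;> ring

theorem qmul_one (i : Int) (a : Int × Int) : qmul i a (1, 0) = a := by simp [qmul]

theorem qone_mul (i : Int) (a : Int × Int) : qmul i (1, 0) a = a := by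
  rw [qmul_comm]; exact qmul_one i a

theorem qpow_add (i : Int) (x : Int × Int) (m n : Nat) :
    qpow i x (m + n) = qmul i (qpow i x m) (qpow i x n) := by
  induction m with
  | zero => simp [qpow, qone_mul]
  | succ m ih =>
    have h : m + 1 + n = (m + n) + 1 := by ring
    rw [h]
    show qmul i x (qpow i x (m + n)) = qmul i (qmul i x (qpow i x m)) (qpow i x n)
    rw [ih, qmul_assoc]

theorem qpow_sq (i : Int) (x : Int × Int) (m : Nat) :
    qmul i (qpow i x m) (qpow i x m) = qpow i x (2 * m) := by
  rw [two_mul, qpow_add]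

theorem qpow_congr {p i : Int} {a b : Int × Int} (h : PM p a b) (n : Nat) :
    PM p (qpow i a n) (qpow i b n) := by
  induction n with
  | zero => exact PM_refl p _
  | succ n ih => exact qmul_congr h ih

theorem qpow_qmul_self (i : Int) (x : Int × Int) (m : Nat) :
    qpow i (qmul i x x) m = qpow i x (2 * m) := by
  induction m with
  | zero => rfl
  | succ m ih =>
    have h2 : 2 * (m + 1) = (2 * m + 1) + 1 := by ring
    rw [h2]
    show qmul i (qmul i x x) (qpow i (qmul i x x) m) = qmul i x (qpow i x (2 * m + 1))
    rw [ih, qmul_assoc]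
    rfl

-- one squaring step of loopB is reduction of an exact square, one multiply step of an exact product
theorem loopB_step_sq (p i : Int) (r : Int × Int) :
    ((PySem.Int.mod (r.1 ^ 2 + i * r.2 ^ 2) p, PySem.Int.mod (2 * r.1 * r.2) p) : Int × Int)
      = red p (qmul i r r) := by
  simp only [red, qmul, Prod.mk.injEq]
  constructor <;> (congr 1; ring)

theorem loopB_step_mul (p i : Int) (x s : Int × Int) :
    ((PySem.Int.mod (x.1 * s.1 + i * x.2 * s.2) p, PySem.Int.mod (x.2 * s.1 + x.1 * s.2) p) : Int × Int)
      = red p (qmul i x s) := rfl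

-- main invariant of B's for-loop: starting from an accumulator congruent to x^k (mod p, componentwise),
-- consuming bit list L yields the reduction of x^(k·2^|L| + valM L), provided at least one step runs
theorem loopB_eq (x : Int × Int) (p i : Int) :
    ∀ (L : List Bool) (r : Int × Int) (k : Nat), PM p r (qpow i x k) → L ≠ [] →
      loopB x p i L r = red p (qpow i x (k * 2 ^ L.length + valM L)) := by
  intro L
  induction L with
  | nil => intro _ _ _ h; exact absurd rfl h
  | cons b rest ih =>
    intro r k hr _
    rw [loopB]
    -- the new accumulator is the reduction of a term congruent to x^(2k + bit)
    have hs : PM p (qmul i r r) (qpow i x (2 * k)) := by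
      rw [← qpow_sq]; exact qmul_congr hr hr
    have hacc : (if b then (PySem.Int.mod (x.1 * (red p (qmul i r r)).1 + i * x.2 * (red p (qmul i r r)).2) p,
                            PySem.Int.mod (x.2 * (red p (qmul i r r)).1 + x.1 * (red p (qmul i r r)).2) p)
                 else red p (qmul i r r))
               = red p (if b then qmul i x (red p (qmul i r r)) else qmul i r r) := by
      cases b <;> simp [loopB_step_mul]
    have hcong : PM p (if b then qmul i x (red p (qmul i r r)) else qmul i r r)
                   (qpow i x (2 * k + (if b then 1 else 0))) := by
      cases b with
      | false => simpa using hs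
      | true =>
        show PM p (qmul i x (red p (qmul i r r))) (qpow i x (2 * k + 1))
        have h1 : qpow i x (2 * k + 1) = qmul i x (qpow i x (2 * k)) := rfl
        rw [h1]
        exact qmul_congr (PM_refl p x) (PM_trans (PM_red p _) hs)
    have hexp : k * 2 ^ (b :: rest).length + valM (b :: rest)
              = (2 * k + (if b then 1 else 0)) * 2 ^ rest.length + valM rest := by
      simp only [valM, List.length_cons, pow_succ]
      cases b <;> simp <;> try ring
    rw [loopB_step_sq, hacc, hexp]
    by_cases hrest : rest = []
    · subst hrest
      simp only [loopB, List.length_nil, pow_zero, mul_one, valM, Nat.add_zero]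
      exact red_congr hcong
    · exact ih _ _ (PM_trans (PM_red p _) hcong) hrest

-- the bit list of m has MSB-first value m
theorem valM_append (L : List Bool) (b : Bool) :
    valM (L ++ [b]) = 2 * valM L + (if b then 1 else 0) := by
  induction L with
  | nil => simp [valM]
  | cons c rest ih =>
    simp only [List.cons_append, valM, List.length_append, List.length_cons, List.length_nil, ih]
    cases c <;> simp [pow_succ] <;> try ring

theorem valM_reverse_bitsB : ∀ m : Nat, valM (bitsB m).reverse = m := by
  intro m
  induction m using Nat.strong_induction_on with
  | _ m ih =>
    match m with
    | 0 => simp [bitsB, valM]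
    | m + 1 =>
      rw [bitsB]
      simp only [List.reverse_cons, valM_append]
      rw [ih ((m + 1) / 2) (by omega)]
      by_cases h : (m + 1) % 2 = 1 <;> simp [h] <;> omega

theorem bitsB_ne_nil (m : Nat) (h : m ≠ 0) : (bitsB m).reverse ≠ [] := by
  match m with
  | 0 => exact absurd rfl h
  | m + 1 => simp [bitsB]

-- A's recursion also computes the reduction of the exact power
theorem powA_eq (p i : Int) : ∀ n : Nat, ∀ x : Int × Int, n ≠ 0 →
    powA x n p i = red p (qpow i x n) := by
  intro n
  induction n using Nat.strong_induction_on with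
  | _ n ih =>
    intro x hn
    rw [powA]
    simp only [hn, if_false]
    have hsq : square_p2 x p i = red p (qmul i x x) := by
      simp only [square_p2, red, qmul, Prod.mk.injEq]
      constructor <;> (congr 1; ring)
    by_cases hodd : n % 2 = 1
    · simp only [hodd, if_true]
      by_cases hm : (n - 1) / 2 = 0
      · have hn1 : n = 1 := by omega
        subst hn1
        rw [powA]
        simp only [red, qpow, qmul, PySem.Int.mod, Prod.mk.injEq]
        constructor <;> (congr 1; try ring)
      · have hlt : (n - 1) / 2 < n := by omega
        rw [ih _ hlt _ hm, hsq]
        have hnew : PM p (red p (qpow i (red p (qmul i x x)) ((n - 1) / 2)))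
            (qpow i x (2 * ((n - 1) / 2))) := by
          rw [← qpow_qmul_self]
          exact PM_trans (PM_red p _) (qpow_congr (PM_red p _) _)
        set new := red p (qpow i (red p (qmul i x x)) ((n - 1) / 2)) with hdef
        have : ((PySem.Int.mod (x.1 * new.1 + i * x.2 * new.2) p,
                 PySem.Int.mod (x.2 * new.1 + x.1 * new.2) p) : Int × Int)
              = red p (qmul i x new) := rfl
        rw [this]
        have hrepr : n = 2 * ((n - 1) / 2) + 1 := by omega
        conv_rhs => rw [hrepr]
        exact red_congr (qmul_congr (PM_refl p x) hnew)
    · simp only [hodd, if_false]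
      have hm : n / 2 ≠ 0 := by omega
      have hlt : n / 2 < n := by omega
      rw [ih _ hlt _ hm, hsq]
      have h : PM p (qpow i (red p (qmul i x x)) (n / 2)) (qpow i x (2 * (n / 2))) := by
        rw [← qpow_qmul_self]
        exact qpow_congr (PM_red p _) _
      have hrepr : 2 * (n / 2) = n := by omega
      conv_rhs => rw [← hrepr]
      exact red_congr h

-- ===== VERDICT (by name: the statement is the Claim_ definition above) =====
theorem power_p2_spec : Claim_equal_power_p2 := by
  unfold Claim_equal_power_p2
  intro x n p i _ _hpre
  unfold Spec_power_p2 power_p2 power_p2_alt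
  by_cases hn : n.toNat = 0
  · rw [hn, powA]; simp [bitsB, loopB]
  · rw [powA_eq p i _ x hn,
        loopB_eq x p i _ (1, 0) 0 (by exact PM_refl p (1, 0)) (bitsB_ne_nil _ hn)]
    rw [List.length_reverse, valM_reverse_bitsB]
    simp
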